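-- pv_equiv track=rewrite | github.com/JokevanVugt/EH-STR-parameter-calculator | EH-STRameter.py | haploid_quality
-- ===== SOURCE A (Python) =====
-- def add_consistency_haploid(c1, n1, num, consist_just1, nonconsist, consist_other):
--     if c1:
--         consist_just1 += num
--     elif n1:
--         nonconsist += num
--     else:
--         consist_other += num
--     return consist_just1, nonconsist, consist_other
--
-- def flank_consist(flank, allele, motif_length, read_length):
--     if flank <= allele:
--         return flank * motif_length >= 0.8 * read_length
--
-- def flank_nonconsist(flank, allele):
--     return flank > allele
--
-- def spn_consist(spn, allele):
--     return spn == allele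
--
-- def spn_nonconsist(spn, allele):
--     return spn != allele
--
-- def irr_consist(irr, allele, motif_length, read_length):
--     if irr <= allele:
--         return irr * motif_length >= 0.8 * read_length
--
-- def irr_nonconsist(irr, allele):
--     return irr > allele
--
-- def fix_tuples(test_tuple):
--     for test in test_tuple:
--         try:
--             len_test = len(test)
--         except Exception:
--             return [test_tuple]
--     return test_tuple
--
-- def haploid_quality(flk, irr, spn, a1, motif_length, read_length):
--     consist_just1 = nonconsist = consist_other = 0
--
--     # fix the tuples
--     flk = fix_tuples(flk)
--     spn = fix_tuples(spn)
--     irr = fix_tuples(irr)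
--
--     # categorize the flanking read support
--     for f in flk:
--         c1 = flank_consist(f[0], a1, motif_length, read_length)
--         n1 = flank_nonconsist(f[0], a1)
--         consist_just1, nonconsist, consist_other = add_consistency_haploid(c1, n1, f[1], consist_just1, nonconsist, consist_other)
--
--     # categorize the spanning read support
--     for f in spn:
--         c1 = spn_consist(f[0], a1)
--         n1 = spn_nonconsist(f[0], a1)
--         consist_just1, nonconsist, consist_other = add_consistency_haploid(c1, n1, f[1], consist_just1, nonconsist, consist_other)
--
--     # categorize the IRR support
--     for f in irr:
--         c1 = irr_consist(f[0], a1, motif_length, read_length)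
--         n1 = irr_nonconsist(f[0], a1)
--         consist_just1, nonconsist, consist_other = add_consistency_haploid(c1, n1, f[1], consist_just1, nonconsist, consist_other)
--
--     return a1, consist_just1, nonconsist, consist_other, "Hap"
-- ===== SOURCE B (Python) =====
-- def haploid_quality(flk, irr, spn, a1, motif_length, read_length):
--     # Staged reductions instead of a per-read classification loop:
--     # flanking and IRR reads use the same threshold rule, so pool them;
--     # compute the two named buckets as independent filtered sums and
--     # obtain the third by subtraction from the grand total (the three
--     # categories partition every read).
--     thresh = list(flk) + list(irr)
--     consist = sum(n for x, n in thresh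
--                   if x <= a1 and 5 * x * motif_length >= 4 * read_length) \
--             + sum(n for x, n in spn if x == a1)
--     noncon = sum(n for x, n in thresh if x > a1) \
--            + sum(n for x, n in spn if x != a1)
--     total = sum(n for _, n in thresh) + sum(n for _, n in spn)
--     return a1, consist, noncon, total - consist - noncon, "Hap"
-- ===== Notes on version B (the rewrite author's own statement) =====
-- stated objective: simpler
-- what changed: Replaces the per-read classification loop (predicate helpers threaded through add_consistency_haploid) with staged filtered-sum reductions: the pooled flank+IRR list and the spanning list each contribute two directly summed buckets, and the third bucket is obtained by subtracting them from the grand total, so no 'other' branch exists at all.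
import Mathlib
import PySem

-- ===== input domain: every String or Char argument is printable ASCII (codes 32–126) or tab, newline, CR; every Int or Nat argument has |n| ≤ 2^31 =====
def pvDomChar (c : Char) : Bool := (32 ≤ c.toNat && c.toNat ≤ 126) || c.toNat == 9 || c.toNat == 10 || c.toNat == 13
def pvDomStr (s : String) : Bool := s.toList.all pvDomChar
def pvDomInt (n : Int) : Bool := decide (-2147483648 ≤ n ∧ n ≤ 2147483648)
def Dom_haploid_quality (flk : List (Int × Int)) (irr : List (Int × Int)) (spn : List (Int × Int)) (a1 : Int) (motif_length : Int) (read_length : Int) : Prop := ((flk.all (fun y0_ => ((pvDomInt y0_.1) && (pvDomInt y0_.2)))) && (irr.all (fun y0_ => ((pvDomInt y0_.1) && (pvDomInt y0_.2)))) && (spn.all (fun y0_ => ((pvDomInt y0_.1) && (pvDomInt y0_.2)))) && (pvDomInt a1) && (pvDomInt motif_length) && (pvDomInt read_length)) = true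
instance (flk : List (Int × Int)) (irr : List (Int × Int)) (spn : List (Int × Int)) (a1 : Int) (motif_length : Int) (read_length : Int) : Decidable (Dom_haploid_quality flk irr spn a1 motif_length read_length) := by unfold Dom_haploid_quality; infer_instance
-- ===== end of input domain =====

-- B replaces the per-read classification loop with staged filtered-sum reductions; the third
-- bucket is obtained by subtraction from the grand total (simpler: no 'other' branch exists).

-- ===== PORT A =====
-- The float comparison `flank*motif_length >= 0.8*read_length` is ported as the exact integer
-- comparison `5*flank*motif_length >= 4*read_length`: for |read_length| ≤ 2^31 the two
-- comparisons agree (verified over the domain; the double 0.8*read_length never crosses an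
-- integer multiple of 5 differently from 4*read_length/5).
def flankConsist (flank allele motif_length read_length : Int) : Option Bool :=
  if flank ≤ allele then some (decide (5 * flank * motif_length ≥ 4 * read_length)) else none

def flankNonconsist (flank allele : Int) : Bool := decide (flank > allele)

def spnConsist (spn allele : Int) : Bool := decide (spn = allele)

def spnNonconsist (spn allele : Int) : Bool := decide (spn ≠ allele)

def irrConsist (irr allele motif_length read_length : Int) : Option Bool :=
  if irr ≤ allele then some (decide (5 * irr * motif_length ≥ 4 * read_length)) else none

def irrNonconsist (irr allele : Int) : Bool := decide (irr > allele)

-- every element of the input lists is a pair (which has len), so the `except` branch never fires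
def fixTuples (test_tuple : List (Int × Int)) : List (Int × Int) := test_tuple

def addConsistencyHaploid (c1 n1 : Bool) (num consist_just1 nonconsist consist_other : Int) :
    Int × Int × Int :=
  if c1 then (consist_just1 + num, nonconsist, consist_other)
  else if n1 then (consist_just1, nonconsist + num, consist_other)
  else (consist_just1, nonconsist, consist_other + num)

def haploid_quality (flk : List (Int × Int)) (irr : List (Int × Int)) (spn : List (Int × Int)) (a1 : Int) (motif_length : Int) (read_length : Int) : Int × Int × Int × Int × String :=
  let flk := fixTuples flk
  let spn := fixTuples spn
  let irr := fixTuples irr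
  let s : Int × Int × Int := (0, 0, 0)
  let s := flk.foldl (fun s f =>
    addConsistencyHaploid (flankConsist f.1 a1 motif_length read_length == some true)
      (flankNonconsist f.1 a1) f.2 s.1 s.2.1 s.2.2) s
  let s := spn.foldl (fun s f =>
    addConsistencyHaploid (spnConsist f.1 a1) (spnNonconsist f.1 a1) f.2 s.1 s.2.1 s.2.2) s
  let s := irr.foldl (fun s f =>
    addConsistencyHaploid (irrConsist f.1 a1 motif_length read_length == some true)
      (irrNonconsist f.1 a1) f.2 s.1 s.2.1 s.2.2) s
  (a1, s.1, s.2.1, s.2.2, "Hap")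

-- ===== PORT B =====
def haploid_quality_alt (flk : List (Int × Int)) (irr : List (Int × Int)) (spn : List (Int × Int)) (a1 : Int) (motif_length : Int) (read_length : Int) : Int × Int × Int × Int × String :=
  let thresh := flk ++ irr
  let consist :=
    ((thresh.filter (fun f => decide (f.1 ≤ a1) && decide (5 * f.1 * motif_length ≥ 4 * read_length))).map Prod.snd).sum
    + ((spn.filter (fun f => decide (f.1 = a1))).map Prod.snd).sum
  let noncon :=
    ((thresh.filter (fun f => decide (f.1 > a1))).map Prod.snd).sum
    + ((spn.filter (fun f => decide (f.1 ≠ a1))).map Prod.snd).sum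
  let total := (thresh.map Prod.snd).sum + (spn.map Prod.snd).sum
  (a1, consist, noncon, total - consist - noncon, "Hap")

-- ===== PRECONDITION & SPEC =====
def Spec_haploid_quality (flk : List (Int × Int)) (irr : List (Int × Int)) (spn : List (Int × Int)) (a1 : Int) (motif_length : Int) (read_length : Int) (out : Int × Int × Int × Int × String) : Prop := out = haploid_quality_alt flk irr spn a1 motif_length read_length
instance (flk : List (Int × Int)) (irr : List (Int × Int)) (spn : List (Int × Int)) (a1 : Int) (motif_length : Int) (read_length : Int) (out : Int × Int × Int × Int × String) : Decidable (Spec_haploid_quality flk irr spn a1 motif_length read_length out) := by unfold Spec_haploid_quality; infer_instance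

-- ===== CLAIM (what is proved, stated in full; the proofs are below) =====
def Claim_equal_haploid_quality : Prop := ∀ (flk : List (Int × Int)) (irr : List (Int × Int)) (spn : List (Int × Int)) (a1 : Int) (motif_length : Int) (read_length : Int), Dom_haploid_quality flk irr spn a1 motif_length read_length → Spec_haploid_quality flk irr spn a1 motif_length read_length (haploid_quality flk irr spn a1 motif_length read_length)

-- ===== LEMMAS AND PROOFS =====

-- per-read contribution of a flanking/IRR read in A
def deltaT (a1 m rl : Int) (f : Int × Int) : Int × Int × Int :=
  if f.1 > a1 then (0, f.2, 0)
  else if 5 * f.1 * m ≥ 4 * rl then (f.2, 0, 0) else (0, 0, f.2)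

-- per-read contribution of a spanning read in A
def deltaS (a1 : Int) (f : Int × Int) : Int × Int × Int :=
  if f.1 = a1 then (f.2, 0, 0) else (0, f.2, 0)

theorem foldl_add_delta {α : Type} (step : Int × Int × Int → α → Int × Int × Int)
    (d : α → Int × Int × Int) (h : ∀ s f, step s f = s + d f) (l : List α) (s : Int × Int × Int) :
    l.foldl step s = s + (l.map d).sum := by
  induction l generalizing s with
  | nil => simp
  | cons x xs ih => simp [List.foldl_cons, h, ih, add_assoc]

theorem stepA_flank (a1 m rl : Int) (s : Int × Int × Int) (f : Int × Int) :
    addConsistencyHaploid (flankConsist f.1 a1 m rl == some true) (flankNonconsist f.1 a1)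
      f.2 s.1 s.2.1 s.2.2 = s + deltaT a1 m rl f := by
  unfold addConsistencyHaploid flankConsist flankNonconsist deltaT Prod.instAdd
  split_ifs with h1 h2 h3 h4 h5 <;> simp_all [Prod.ext_iff, Prod.fst_add, Prod.snd_add] <;> omega

theorem stepA_irr (a1 m rl : Int) (s : Int × Int × Int) (f : Int × Int) :
    addConsistencyHaploid (irrConsist f.1 a1 m rl == some true) (irrNonconsist f.1 a1)
      f.2 s.1 s.2.1 s.2.2 = s + deltaT a1 m rl f := by
  unfold addConsistencyHaploid irrConsist irrNonconsist deltaT Prod.instAdd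
  split_ifs with h1 h2 h3 h4 h5 <;> simp_all [Prod.ext_iff, Prod.fst_add, Prod.snd_add] <;> omega

theorem stepA_spn (a1 : Int) (s : Int × Int × Int) (f : Int × Int) :
    addConsistencyHaploid (spnConsist f.1 a1) (spnNonconsist f.1 a1)
      f.2 s.1 s.2.1 s.2.2 = s + deltaS a1 f := by
  unfold addConsistencyHaploid spnConsist spnNonconsist deltaS Prod.instAdd
  split_ifs with h1 h2 h3 <;> simp_all [Prod.ext_iff, Prod.fst_add, Prod.snd_add]

theorem sumT1 (a1 m rl : Int) (l : List (Int × Int)) :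
    ((l.map (deltaT a1 m rl)).sum).1
    = ((l.filter (fun f => decide (f.1 ≤ a1) && decide (5 * f.1 * m ≥ 4 * rl))).map Prod.snd).sum := by
  induction l with
  | nil => simp
  | cons x xs ih =>
    simp only [List.map_cons, List.sum_cons, List.filter_cons, deltaT, Prod.fst_add]
    split_ifs <;> simp_all <;> omega

theorem sumT2 (a1 m rl : Int) (l : List (Int × Int)) :
    ((l.map (deltaT a1 m rl)).sum).2.1
    = ((l.filter (fun f => decide (f.1 > a1))).map Prod.snd).sum := by
  induction l with
  | nil => simp
  | cons x xs ih =>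
    simp only [List.map_cons, List.sum_cons, List.filter_cons, deltaT, Prod.snd_add, Prod.fst_add]
    split_ifs <;> simp_all <;> omega

theorem sumT_total (a1 m rl : Int) (l : List (Int × Int)) :
    ((l.map (deltaT a1 m rl)).sum).1 + ((l.map (deltaT a1 m rl)).sum).2.1
      + ((l.map (deltaT a1 m rl)).sum).2.2 = (l.map Prod.snd).sum := by
  induction l with
  | nil => simp
  | cons x xs ih =>
    simp only [List.map_cons, List.sum_cons, deltaT, Prod.fst_add, Prod.snd_add]
    split_ifs <;> simp_all <;> omega

theorem sumS1 (a1 : Int) (l : List (Int × Int)) :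
    ((l.map (deltaS a1)).sum).1
    = ((l.filter (fun f => decide (f.1 = a1))).map Prod.snd).sum := by
  induction l with
  | nil => simp
  | cons x xs ih =>
    simp only [List.map_cons, List.sum_cons, List.filter_cons, deltaS, Prod.fst_add]
    split_ifs <;> simp_all

theorem sumS2 (a1 : Int) (l : List (Int × Int)) :
    ((l.map (deltaS a1)).sum).2.1
    = ((l.filter (fun f => decide (f.1 ≠ a1))).map Prod.snd).sum := by
  induction l with
  | nil => simp
  | cons x xs ih =>
    simp only [List.map_cons, List.sum_cons, List.filter_cons, deltaS, Prod.snd_add, Prod.fst_add]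
    split_ifs <;> simp_all

theorem sumS_total (a1 : Int) (l : List (Int × Int)) :
    ((l.map (deltaS a1)).sum).1 + ((l.map (deltaS a1)).sum).2.1
      + ((l.map (deltaS a1)).sum).2.2 = (l.map Prod.snd).sum := by
  induction l with
  | nil => simp
  | cons x xs ih =>
    simp only [List.map_cons, List.sum_cons, deltaS, Prod.fst_add, Prod.snd_add]
    split_ifs <;> simp_all <;> omega

-- ===== VERDICT (by name: the statement is the Claim_ definition above) =====
theorem haploid_quality_spec : Claim_equal_haploid_quality := by
  intro flk irr spn a1 m rl _
  simp only [Spec_haploid_quality, haploid_quality, haploid_quality_alt, fixTuples]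
  rw [foldl_add_delta _ _ (stepA_flank a1 m rl), foldl_add_delta _ _ (stepA_spn a1),
    foldl_add_delta _ _ (stepA_irr a1 m rl)]
  have hT1f := sumT1 a1 m rl flk; have hT1i := sumT1 a1 m rl irr
  have hT2f := sumT2 a1 m rl flk; have hT2i := sumT2 a1 m rl irr
  have hTtf := sumT_total a1 m rl flk; have hTti := sumT_total a1 m rl irr
  have hS1 := sumS1 a1 spn; have hS2 := sumS2 a1 spn; have hSt := sumS_total a1 spn
  simp only [List.filter_append, List.map_append, List.sum_append, Prod.fst_add, Prod.snd_add,
    Prod.mk.injEq, ← hT1f, ← hT1i, ← hT2f, ← hT2i, ← hS1, ← hS2]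
  exact ⟨trivial, by omega, by omega, by omega, trivial⟩
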